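-- pv_equiv track=rewrite | github.com/argaman-aloni/sam_learning | sam_learning/core/dependency_set.py | minimize_cnf_clauses
-- ===== SOURCE A (Python) =====
-- import itertools
-- from typing import Set, Dict, List, Optional, Union
--
-- NOT_PREFIX = "(not"
--
-- AFTER_NOT_PREFIX_INDEX = 5
--
-- RIGHT_BRACKET_INDEX = -1
--
-- def check_complementary_literals(clause: Set[str]) -> bool:
--     """Checks if any two literals in the clause are complementary.
--
--     :param clause: the clause to check.
--     :return: True if any two literals in the clause are complementary, False otherwise.
--     """
--     for first_literal, second_literal in itertools.combinations(clause, 2):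
--         if first_literal.startswith(NOT_PREFIX) and not second_literal.startswith(NOT_PREFIX) and \
--                 first_literal[AFTER_NOT_PREFIX_INDEX:RIGHT_BRACKET_INDEX] == second_literal:
--             # Complementary literals
--             return True
--
--         if not first_literal.startswith(NOT_PREFIX) and second_literal.startswith(NOT_PREFIX) and \
--                 first_literal == second_literal[AFTER_NOT_PREFIX_INDEX:RIGHT_BRACKET_INDEX]:
--             # Complementary literals
--             return True
--
--     return False
--
-- def minimize_cnf_clauses(clauses: List[Set[str]], assumptions: Set[str] = None) -> List[Set[str]]:
--     """Minimizes the CNF clauses based on unit clauses and complementary literals.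
--
--     :param clauses: the CNF clauses to minimize.
--     :param assumptions: the assumptions to use for the minimization.
--     :return: the minimized CNF clauses.
--     """
--     used_assumptions = assumptions or set()
--     minimized_clauses = [clause for clause in clauses.copy() if len(clause) == 1 if
--                          not clause.intersection(used_assumptions)]
--     unit_clauses = {literal for clause in minimized_clauses for literal in clause}
--     if check_complementary_literals(unit_clauses):
--         raise ValueError("The unit clauses are contradicting one another!")
--
--     used_assumptions.update(unit_clauses)
--     non_unit_clauses = [clause for clause in clauses if len(clause) > 1]
--     for clause in non_unit_clauses:
--         # Checking if there are complementary literals in the clause - if so, the clause is always true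
--         if check_complementary_literals(clause) or any([assumption in clause for assumption in used_assumptions]):
--             continue
--
--         for assumption in used_assumptions:
--             if assumption.startswith(NOT_PREFIX) and check_complementary_literals(clause.union({assumption})):
--                 # We can remove the complementary literal
--                 clause.remove(assumption[AFTER_NOT_PREFIX_INDEX:RIGHT_BRACKET_INDEX])
--
--             elif not assumption.startswith(NOT_PREFIX) and check_complementary_literals(clause.union({assumption})):
--                 # We can remove the complementary literal
--                 clause.remove(f"{NOT_PREFIX} {assumption})")
--
--         # There are no assumptions in the clause
--         if len(clause) > 0:
--             minimized_clauses.append(clause)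
--
--     return minimized_clauses
-- ===== SOURCE B (Python) =====
-- NOT_PREFIX = "(not"
--
--
-- def minimize_cnf_clauses(clauses, assumptions=None):
--     # Return-value re-implementation: set-based membership instead of pairwise
--     # scans; does not mutate its arguments (A mutates the clause sets in place).
--     used = set(assumptions) if assumptions else set()
--     minimized = [c for c in clauses if len(c) == 1 and not (c & used)]
--     units = {lit for c in minimized for lit in c}
--     for lit in units:
--         if lit.startswith(NOT_PREFIX):
--             t = lit[5:-1]
--             if t in units and not t.startswith(NOT_PREFIX):
--                 raise ValueError("The unit clauses are contradicting one another!")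
--     used |= units
--     neg_targets = {a[5:-1] for a in used if a.startswith(NOT_PREFIX)}
--
--     def removable(lit):
--         if lit.startswith(NOT_PREFIX):
--             t = lit[5:-1]
--             return (lit.startswith("(not ") and lit.endswith(")")
--                     and t in used and not t.startswith(NOT_PREFIX))
--         return lit in neg_targets
--
--     result = list(minimized)
--     for clause in clauses:
--         if len(clause) <= 1:
--             continue
--         if any(lit.startswith(NOT_PREFIX) and not lit[5:-1].startswith(NOT_PREFIX)
--                and lit[5:-1] in clause for lit in clause):
--             continue
--         if any(lit in used for lit in clause):
--             continue
--         reduced = {lit for lit in clause if not removable(lit)}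
--         if reduced:
--             result.append(reduced)
--     return result
-- ===== Notes on version B (the rewrite author's own statement) =====
-- stated objective: faster
-- what changed: B replaces A's quadratic itertools.combinations scans and the per-assumption mutate-and-recheck loop by set-based membership tests: complements are detected in one pass per clause via an O(1) lookup, and removable literals are decided by a precomputed set of negated-assumption targets plus a shape test, one filter pass per clause.
import Mathlib
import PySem

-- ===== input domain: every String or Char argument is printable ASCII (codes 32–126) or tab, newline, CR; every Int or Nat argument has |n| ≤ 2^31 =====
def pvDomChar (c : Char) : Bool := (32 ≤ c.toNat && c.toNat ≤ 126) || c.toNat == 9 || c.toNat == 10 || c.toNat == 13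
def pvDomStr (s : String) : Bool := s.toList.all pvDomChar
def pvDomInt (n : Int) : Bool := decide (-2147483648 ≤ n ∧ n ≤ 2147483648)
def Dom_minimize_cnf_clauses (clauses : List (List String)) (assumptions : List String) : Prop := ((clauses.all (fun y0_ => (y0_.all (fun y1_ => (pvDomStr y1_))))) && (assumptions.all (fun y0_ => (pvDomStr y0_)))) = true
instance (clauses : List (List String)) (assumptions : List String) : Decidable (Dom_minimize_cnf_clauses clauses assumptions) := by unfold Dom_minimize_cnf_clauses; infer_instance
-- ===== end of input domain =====

-- B rewrites A's pairwise/mutating clause minimisation as per-clause filters with precomputed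
-- membership structures (objective: faster); equivalence is about the RETURN value only —
-- Python A mutates the clause sets and the assumptions set in place, B does not.

-- ===== PORT A =====
-- shared literal helpers (used by both ports and by Pre_)
def litPref (s : String) : Bool := PySem.Str.startswith s "(not"        -- s.startswith("(not")
def litStrip (s : String) : String := PySem.Str.slice s (some 5) (some (-1))   -- s[5:-1]
def litNot (a : String) : String := String.ofList ("(not ".toList ++ a.toList ++ [')'])  -- f"(not {a})"

-- itertools.combinations(clause, 2) with the two complementary-pair branches
def checkComp : List String → Bool
  | [] => false
  | x :: rest =>
      (rest.any (fun y =>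
        (litPref x && !litPref y && (litStrip x == y)) ||
        (!litPref x && litPref y && (x == litStrip y)))) || checkComp rest

-- body of A's `for assumption in used_assumptions` loop over one clause.
-- Python's clause.remove raises KeyError when the literal is absent; Pre_ excludes those
-- inputs, so Set.discard coincides with remove on every admitted input.
def assumeStep (cl : List String) (a : String) : List String :=
  if litPref a && checkComp (PySem.Set.add cl a) then PySem.Set.discard cl (litStrip a)
  else if !litPref a && checkComp (PySem.Set.add cl a) then PySem.Set.discard cl (litNot a)
  else cl

def minimize_cnf_clauses (clauses : List (List String)) (assumptions : List String) : List (List String) :=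
  let used0 := assumptions  -- used_assumptions = assumptions or set()
  let minimized := clauses.filter (fun c => c.length == 1 && (PySem.Set.inter c used0).isEmpty)
  let unitClauses : PySem.Set String := PySem.Set.ofList (minimized.flatMap (fun c => c))
  if checkComp unitClauses then []  -- Python: raise ValueError (excluded by Pre_)
  else
    let used := PySem.Set.update (PySem.Set.ofList used0) unitClauses
    (clauses.filter (fun c => 1 < c.length)).foldl (fun acc c =>
      if checkComp c || used.any (fun a => PySem.Set.contains c a) then acc
      else
        let c' := used.foldl assumeStep c
        if 0 < c'.length then acc ++ [c'] else acc) minimized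

-- ===== PORT B =====
-- single-pass complement detection by membership
def hasComp (c : List String) : Bool :=
  c.any (fun l => litPref l && !litPref (litStrip l) && c.contains (litStrip l))

def removableLit (used negT : List String) (l : String) : Bool :=
  if litPref l then
    PySem.Str.startswith l "(not " && PySem.Str.endswith l ")" &&
      used.contains (litStrip l) && !litPref (litStrip l)
  else negT.contains l

def minimize_cnf_clauses_alt (clauses : List (List String)) (assumptions : List String) : List (List String) :=
  let used0 : PySem.Set String := PySem.Set.ofList assumptions
  let minimized := clauses.filter (fun c => c.length == 1 && c.all (fun l => !PySem.Set.contains used0 l))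
  let units : PySem.Set String := PySem.Set.ofList (minimized.flatMap (fun c => c))
  if hasComp units then []  -- B raises the same ValueError here (excluded by Pre_)
  else
    let used := PySem.Set.update used0 units
    let negT : PySem.Set String := PySem.Set.ofList ((used.filter litPref).map litStrip)
    minimized ++ (clauses.filter (fun c => 1 < c.length)).filterMap (fun c =>
      if hasComp c || c.any (fun l => PySem.Set.contains used l) then none
      else
        let c' := c.filter (fun l => !removableLit used negT l)
        if c'.isEmpty then none else some c')

-- ===== PRECONDITION & SPEC =====
-- clause c contains an internally complementary pair
def CompIn (c : List String) : Prop :=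
  ∃ l ∈ c, litPref l = true ∧ litPref (litStrip l) = false ∧ litStrip l ∈ c


-- the unit-clause literals A collects (unit clauses disjoint from the assumptions)
def unitLits (clauses : List (List String)) (assumptions : List String) : List String :=
  (clauses.filter (fun c => c.length == 1 && c.all (fun l => !assumptions.contains l))).flatMap (fun c => c)

-- A's used_assumptions (assumptions updated with the unit literals), as one list
def usedL (clauses : List (List String)) (assumptions : List String) : List String :=
  assumptions ++ unitLits clauses assumptions

-- Pre_ excludes (i) inputs whose element lists are not duplicate-free — they do not encode the
-- Python sets A takes; (ii) inputs with contradicting unit literals, where A raises ValueError;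
-- (iii) inputs where A calls clause.remove on an absent literal (a malformed "(not…" literal
-- matched an assumption), where A raises KeyError.  A returns normally on everything admitted.
def Pre_minimize_cnf_clauses (clauses : List (List String)) (assumptions : List String) : Prop :=
  assumptions.Nodup ∧ (∀ c ∈ clauses, c.Nodup) ∧
  ¬ CompIn (unitLits clauses assumptions) ∧
  (∀ c ∈ clauses, 1 < c.length → ¬ CompIn c →
    (∀ a ∈ usedL clauses assumptions, a ∉ c) →
    ∀ a ∈ usedL clauses assumptions, litPref a = false →
      (∃ l ∈ c, litPref l = true ∧ litStrip l = a) → litNot a ∈ c)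

instance (clauses : List (List String)) (assumptions : List String) :
    Decidable (Pre_minimize_cnf_clauses clauses assumptions) := by
  unfold Pre_minimize_cnf_clauses CompIn; infer_instance

def pvWitness_minimize_cnf_clauses : List (List String) × List String :=
  ([["p"], ["q", "(not p)"]], [])

def Spec_minimize_cnf_clauses (clauses : List (List String)) (assumptions : List String) (out : List (List String)) : Prop := out = minimize_cnf_clauses_alt clauses assumptions
instance (clauses : List (List String)) (assumptions : List String) (out : List (List String)) : Decidable (Spec_minimize_cnf_clauses clauses assumptions out) := by unfold Spec_minimize_cnf_clauses; infer_instance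

-- ===== CLAIM (what is proved, stated in full; the proofs are below) =====
def Claim_equal_minimize_cnf_clauses : Prop := ∀ (clauses : List (List String)) (assumptions : List String), Dom_minimize_cnf_clauses clauses assumptions → Pre_minimize_cnf_clauses clauses assumptions → Spec_minimize_cnf_clauses clauses assumptions (minimize_cnf_clauses clauses assumptions)


-- ===== LEMMAS AND PROOFS =====

def remB (u : List String) (s : String) : Bool :=
  (!litPref s && u.any (fun b => litPref b && (litStrip b == s))) ||
  (litPref s && PySem.Str.startswith s "(not " && PySem.Str.endswith s ")" &&
    u.contains (litStrip s) && !litPref (litStrip s))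

def RemP (u : List String) (s : String) : Prop :=
  (litPref s = false ∧ ∃ b ∈ u, litPref b = true ∧ litStrip b = s) ∨
  (litPref s = true ∧ PySem.Str.startswith s "(not " = true ∧ PySem.Str.endswith s ")" = true ∧
    litStrip s ∈ u ∧ litPref (litStrip s) = false)


theorem hasComp_iff (c : List String) : hasComp c = true ↔ CompIn c := by
  simp [hasComp, CompIn, List.any_eq_true, and_assoc]

theorem checkComp_iff (c : List String) : checkComp c = true ↔ CompIn c := by
  induction c with
  | nil => simp [checkComp, CompIn]
  | cons x rest ih =>
    simp only [checkComp, Bool.or_eq_true, List.any_eq_true, ih]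
    constructor
    · rintro (⟨y, hy, h⟩ | ⟨l, hl, h1, h2, h3⟩)
      · simp only [Bool.and_eq_true, beq_iff_eq, Bool.not_eq_true'] at h
        rcases h with ⟨⟨hx, hy'⟩, he⟩ | ⟨⟨hx, hy'⟩, he⟩
        · exact ⟨x, List.mem_cons_self, hx, by rw [he]; exact hy', by rw [he]; exact List.mem_cons_of_mem _ hy⟩
        · exact ⟨y, List.mem_cons_of_mem _ hy, hy', by rw [← he]; exact hx, by rw [← he]; exact List.mem_cons_self⟩
      · exact ⟨l, List.mem_cons_of_mem _ hl, h1, h2, List.mem_cons_of_mem _ h3⟩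
    · rintro ⟨l, hl, h1, h2, h3⟩
      rcases List.mem_cons.mp hl with rfl | hl'
      · rcases List.mem_cons.mp h3 with he | h3'
        · rw [he, h1] at h2; cases h2
        · exact Or.inl ⟨litStrip l, h3', by simp [h1, h2]⟩
      · rcases List.mem_cons.mp h3 with he | h3'
        · exact Or.inl ⟨l, hl', by simp [h1, h2, ← he]⟩
        · exact Or.inr ⟨l, hl', h1, h2, h3'⟩

theorem checkComp_eq_hasComp (c : List String) : checkComp c = hasComp c := by
  rw [← Bool.coe_iff_coe, checkComp_iff, hasComp_iff]

theorem hasComp_false_sub {c c' : List String} (h : hasComp c = false)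
    (hsub : ∀ x ∈ c', x ∈ c) : hasComp c' = false := by
  rw [← Bool.not_eq_true, hasComp_iff] at h ⊢
  intro ⟨l, hl, h1, h2, h3⟩
  exact h ⟨l, hsub l hl, h1, h2, hsub _ h3⟩

theorem toList_litNot (a : String) :
    (litNot a).toList = '(' :: 'n' :: 'o' :: 't' :: ' ' :: (a.toList ++ [')']) := by
  simp [litNot]

theorem litPref_litNot (a : String) : litPref (litNot a) = true := by
  simp [litPref, litNot, PySem.Str.startswith, PySem.Chars.startswith]

theorem litStrip_of_shape (s : String) (m : List Char)
    (h : s.toList = '(' :: 'n' :: 'o' :: 't' :: ' ' :: (m ++ [')'])) :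
    litStrip s = String.ofList m := by
  have hlen : s.toList.length = m.length + 6 := by simp [h]
  have h5 : PySem.List.clampIdx s.toList.length 5 = 5 := by
    simp [PySem.List.clampIdx, hlen]
  have h1 : PySem.List.clampIdx s.toList.length (-1) = m.length + 5 := by
    rw [PySem.List.clampIdx_neg_one, hlen]; omega
  simp only [litStrip, PySem.Str.slice, PySem.Chars.slice, PySem.List.slice, h5, h1]
  rw [h]
  simp only [List.drop_succ_cons, List.drop_zero, show (5:Nat)=4+1 from rfl]
  rw [show m.length + 5 - (4+1) = m.length by omega]
  rw [List.take_append_of_le_length (by omega), List.take_length]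

theorem litStrip_litNot (a : String) : litStrip (litNot a) = a := by
  rw [litStrip_of_shape _ a.toList (toList_litNot a)]
  simp

theorem ew_litNot (a : String) : PySem.Str.endswith (litNot a) ")" = true := by
  simp only [PySem.Str.endswith, PySem.Chars.endswith, toList_litNot]
  rw [List.isSuffixOf_iff_suffix]
  exact ⟨'(' :: 'n' :: 'o' :: 't' :: ' ' :: a.toList, by simp⟩

theorem sw5_litNot (a : String) : PySem.Str.startswith (litNot a) "(not " = true := by
  simp [litNot, PySem.Str.startswith, PySem.Chars.startswith]

theorem shape_of_wf (l : String)
    (h1 : PySem.Str.startswith l "(not " = true)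
    (h2 : PySem.Str.endswith l ")" = true) :
    l = litNot (litStrip l) := by
  simp only [PySem.Str.startswith, PySem.Chars.startswith, List.isPrefixOf_iff_prefix] at h1
  simp only [PySem.Str.endswith, PySem.Chars.endswith, List.isSuffixOf_iff_suffix] at h2
  obtain ⟨rest, hrest⟩ := h1
  obtain ⟨t, ht⟩ := h2
  have ht' : l.toList = t ++ [')'] := by rw [← ht]; rfl
  have hr' : l.toList = '(' :: 'n' :: 'o' :: 't' :: ' ' :: rest := by rw [← hrest]; rfl
  rcases rest.eq_nil_or_concat with rfl | ⟨m, x, rfl⟩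
  · exfalso
    have heq := (hr'.symm.trans ht')
    have := congrArg List.getLast? heq
    simp at this
  · have heq := (hr'.symm.trans ht')
    rw [List.concat_eq_append] at heq
    have hx := congrArg List.getLast? heq
    rw [show '(' :: 'n' :: 'o' :: 't' :: ' ' :: (m ++ [x]) = ('(' :: 'n' :: 'o' :: 't' :: ' ' :: m) ++ [x] by simp] at hx
    rw [List.getLast?_concat, List.getLast?_concat] at hx
    have hx' : x = ')' := by simpa using hx
    subst hx'
    have hshape : l.toList = '(' :: 'n' :: 'o' :: 't' :: ' ' :: (m ++ [')']) := by
      rw [hr']; simp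
    rw [litStrip_of_shape l m hshape]
    apply String.toList_inj.mp
    rw [toList_litNot, hshape]
    simp

theorem checkComp_append_pref (c : List String) (a : String)
    (hnc : hasComp c = false) (ha : litPref a = true) :
    checkComp (c ++ [a]) = true ↔ (litPref (litStrip a) = false ∧ litStrip a ∈ c) := by
  rw [checkComp_iff]
  rw [← Bool.not_eq_true, hasComp_iff] at hnc
  constructor
  · rintro ⟨l, hl, h1, h2, h3⟩
    rcases List.mem_append.mp hl with hlc | hla
    · rcases List.mem_append.mp h3 with h3c | h3a
      · exact absurd ⟨l, hlc, h1, h2, h3c⟩ hnc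
      · simp only [List.mem_singleton] at h3a
        rw [h3a, ha] at h2; cases h2
    · simp only [List.mem_singleton] at hla; subst hla
      rcases List.mem_append.mp h3 with h3c | h3a
      · exact ⟨h2, h3c⟩
      · simp only [List.mem_singleton] at h3a
        rw [h3a, ha] at h2; cases h2
  · rintro ⟨h2, h3⟩
    exact ⟨a, List.mem_append_right _ (by simp), ha, h2, List.mem_append_left _ h3⟩

theorem checkComp_append_nonpref (c : List String) (a : String)
    (hnc : hasComp c = false) (ha : litPref a = false) :
    checkComp (c ++ [a]) = true ↔ ∃ l ∈ c, litPref l = true ∧ litStrip l = a := by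
  rw [checkComp_iff]
  rw [← Bool.not_eq_true, hasComp_iff] at hnc
  constructor
  · rintro ⟨l, hl, h1, h2, h3⟩
    rcases List.mem_append.mp hl with hlc | hla
    · rcases List.mem_append.mp h3 with h3c | h3a
      · exact absurd ⟨l, hlc, h1, h2, h3c⟩ hnc
      · simp only [List.mem_singleton] at h3a
        exact ⟨l, hlc, h1, h3a⟩
    · simp only [List.mem_singleton] at hla; subst hla
      rw [ha] at h1; cases h1
  · rintro ⟨l, hl, h1, h2⟩
    refine ⟨l, List.mem_append_left _ hl, h1, by rw [h2]; exact ha,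
      List.mem_append_right _ (by simp [h2])⟩

theorem remB_iff (u : List String) (s : String) : remB u s = true ↔ RemP u s := by
  simp [remB, RemP, List.any_eq_true, and_assoc]

theorem fold_eq_filter (u : List String) (c : List String)
    (hnc : hasComp c = false) (hdisj : ∀ a ∈ u, a ∉ c) :
    u.foldl assumeStep c = c.filter (fun s => !remB u s) := by
  induction u generalizing c with
  | nil =>
    simp [remB]
  | cons a u ih =>
    have hanotc : a ∉ c := hdisj a List.mem_cons_self
    have hadd : PySem.Set.add c a = c ++ [a] := PySem.Set.add_of_not_mem hanotc
    have hdisj' : ∀ b ∈ u, b ∉ c := fun b hb => hdisj b (List.mem_cons_of_mem _ hb)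
    rw [List.foldl_cons]
    rcases hpa : litPref a with hf | ht
    · -- a does not start with "(not"
      rcases hchk : checkComp (PySem.Set.add c a) with cf | ct
      · have hstep : assumeStep c a = c := by simp [assumeStep, hpa, hchk]
        rw [hstep, ih c hnc hdisj']
        apply List.filter_congr
        intro s hs
        rw [← Bool.coe_iff_coe]
        simp only [Bool.not_eq_true', ← Bool.not_eq_true]
        rw [not_iff_not, remB_iff, remB_iff]
        rw [hadd] at hchk
        have hnw := (checkComp_append_nonpref c a hnc hpa)
        constructor
        · rintro (⟨h1, b, hb, h2, h3⟩ | ⟨h1, h2, h3, h4, h5⟩)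
          · exact Or.inl ⟨h1, b, List.mem_cons_of_mem _ hb, h2, h3⟩
          · exact Or.inr ⟨h1, h2, h3, List.mem_cons_of_mem _ h4, h5⟩
        · rintro (⟨h1, b, hb, h2, h3⟩ | ⟨h1, h2, h3, h4, h5⟩)
          · rcases List.mem_cons.mp hb with rfl | hb'
            · rw [hpa] at h2; cases h2
            · exact Or.inl ⟨h1, b, hb', h2, h3⟩
          · rcases List.mem_cons.mp h4 with he | h4'
            · exfalso
              have : checkComp (c ++ [a]) = true := by
                rw [hnw]; exact ⟨s, hs, h1, he⟩
              rw [this] at hchk; cases hchk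
            · exact Or.inr ⟨h1, h2, h3, h4', h5⟩
      · -- the clause loses (not a)
        have hstep : assumeStep c a = PySem.Set.discard c (litNot a) := by
          simp [assumeStep, hpa, hchk]
        rw [hadd] at hchk
        have hsub : ∀ x ∈ PySem.Set.discard c (litNot a), x ∈ c := by
          intro x hx; exact ((PySem.Set.mem_discard _ _ _).mp hx).1
        rw [hstep, ih _ (hasComp_false_sub hnc hsub) (fun b hb hbc => hdisj' b hb (hsub b hbc))]
        simp only [PySem.Set.discard]
        rw [List.filter_filter]
        apply List.filter_congr
        intro s hs
        rw [← Bool.coe_iff_coe]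
        simp only [Bool.and_eq_true, Bool.not_eq_true', ← Bool.not_eq_true]
        have key : remB (a :: u) s = true ↔ (remB u s = true ∨ s = litNot a) := by
          rw [remB_iff, remB_iff]
          constructor
          · rintro (⟨h1, b, hb, h2, h3⟩ | ⟨h1, h2, h3, h4, h5⟩)
            · rcases List.mem_cons.mp hb with rfl | hb'
              · rw [hpa] at h2; cases h2
              · exact Or.inl (Or.inl ⟨h1, b, hb', h2, h3⟩)
            · rcases List.mem_cons.mp h4 with he | h4'
              · exact Or.inr (by rw [shape_of_wf s h2 h3, he])
              · exact Or.inl (Or.inr ⟨h1, h2, h3, h4', h5⟩)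
          · rintro (h | rfl)
            · rcases h with ⟨h1, b, hb, h2, h3⟩ | ⟨h1, h2, h3, h4, h5⟩
              · exact Or.inl ⟨h1, b, List.mem_cons_of_mem _ hb, h2, h3⟩
              · exact Or.inr ⟨h1, h2, h3, List.mem_cons_of_mem _ h4, h5⟩
            · exact Or.inr ⟨litPref_litNot a, sw5_litNot a, ew_litNot a,
                by rw [litStrip_litNot]; exact List.mem_cons_self,
                by rw [litStrip_litNot]; exact hpa⟩
        constructor
        · rintro ⟨h1, h2⟩ hcon
          rcases key.mp hcon with h | h
          · simp [h1] at h
          · rw [h] at h2; simp at h2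
        · intro h
          refine ⟨?_, ?_⟩
          · cases hb : remB u s with
            | false => simp
            | true => exact (h (key.mpr (Or.inl hb))).elim
          · cases hb : (s == litNot a) with
            | false => simp
            | true => exact (h (key.mpr (Or.inr (beq_iff_eq.mp hb)))).elim
    · -- a starts with "(not"
      rcases hchk : checkComp (PySem.Set.add c a) with cf | ct
      · have hstep : assumeStep c a = c := by simp [assumeStep, hpa, hchk]
        rw [hstep, ih c hnc hdisj']
        apply List.filter_congr
        intro s hs
        rw [← Bool.coe_iff_coe]
        simp only [Bool.not_eq_true', ← Bool.not_eq_true]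
        rw [not_iff_not, remB_iff, remB_iff]
        rw [hadd] at hchk
        have hpw := (checkComp_append_pref c a hnc hpa)
        constructor
        · rintro (⟨h1, b, hb, h2, h3⟩ | ⟨h1, h2, h3, h4, h5⟩)
          · exact Or.inl ⟨h1, b, List.mem_cons_of_mem _ hb, h2, h3⟩
          · exact Or.inr ⟨h1, h2, h3, List.mem_cons_of_mem _ h4, h5⟩
        · rintro (⟨h1, b, hb, h2, h3⟩ | ⟨h1, h2, h3, h4, h5⟩)
          · rcases List.mem_cons.mp hb with he | hb'
            · exfalso
              rw [he] at h3
              have : checkComp (c ++ [a]) = true := by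
                rw [hpw]; exact ⟨by rw [h3]; exact h1, by rw [h3]; exact hs⟩
              rw [this] at hchk; cases hchk
            · exact Or.inl ⟨h1, b, hb', h2, h3⟩
          · rcases List.mem_cons.mp h4 with he | h4'
            · rw [he, hpa] at h5; cases h5
            · exact Or.inr ⟨h1, h2, h3, h4', h5⟩
      · -- the clause loses the complement of a
        have hstep : assumeStep c a = PySem.Set.discard c (litStrip a) := by
          simp [assumeStep, hpa, hchk]
        rw [hadd] at hchk
        obtain ⟨hsp, hsm⟩ := (checkComp_append_pref c a hnc hpa).mp hchk
        have hsub : ∀ x ∈ PySem.Set.discard c (litStrip a), x ∈ c := by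
          intro x hx; exact ((PySem.Set.mem_discard _ _ _).mp hx).1
        rw [hstep, ih _ (hasComp_false_sub hnc hsub) (fun b hb hbc => hdisj' b hb (hsub b hbc))]
        simp only [PySem.Set.discard]
        rw [List.filter_filter]
        apply List.filter_congr
        intro s hs
        rw [← Bool.coe_iff_coe]
        simp only [Bool.and_eq_true, Bool.not_eq_true', ← Bool.not_eq_true]
        have key : remB (a :: u) s = true ↔ (remB u s = true ∨ s = litStrip a) := by
          rw [remB_iff, remB_iff]
          constructor
          · rintro (⟨h1, b, hb, h2, h3⟩ | ⟨h1, h2, h3, h4, h5⟩)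
            · rcases List.mem_cons.mp hb with rfl | hb'
              · exact Or.inr h3.symm
              · exact Or.inl (Or.inl ⟨h1, b, hb', h2, h3⟩)
            · rcases List.mem_cons.mp h4 with he | h4'
              · rw [he, hpa] at h5; cases h5
              · exact Or.inl (Or.inr ⟨h1, h2, h3, h4', h5⟩)
          · rintro (h | rfl)
            · rcases h with ⟨h1, b, hb, h2, h3⟩ | ⟨h1, h2, h3, h4, h5⟩
              · exact Or.inl ⟨h1, b, List.mem_cons_of_mem _ hb, h2, h3⟩
              · exact Or.inr ⟨h1, h2, h3, List.mem_cons_of_mem _ h4, h5⟩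
            · exact Or.inl ⟨hsp, a, List.mem_cons_self, hpa, rfl⟩
        constructor
        · rintro ⟨h1, h2⟩ hcon
          rcases key.mp hcon with h | h
          · simp [h1] at h
          · rw [h] at h2; simp at h2
        · intro h
          refine ⟨?_, ?_⟩
          · cases hb : remB u s with
            | false => simp
            | true => exact (h (key.mpr (Or.inl hb))).elim
          · cases hb : (s == litStrip a) with
            | false => simp
            | true => exact (h (key.mpr (Or.inr (beq_iff_eq.mp hb)))).elim

theorem removable_eq_remB (used : List String) (s : String) :
    removableLit used (PySem.Set.ofList ((used.filter litPref).map litStrip)) s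
      = remB used s := by
  rw [← Bool.coe_iff_coe, remB_iff]
  unfold removableLit RemP
  cases hp : litPref s with
  | false =>
    simp only [Bool.false_eq_true, if_false]
    simp only [List.contains_iff_mem, PySem.Set.mem_ofList, List.mem_map, List.mem_filter]
    constructor
    · rintro ⟨b, ⟨hb, h2⟩, h3⟩
      exact Or.inl ⟨by trivial, b, hb, h2, h3⟩
    · rintro (⟨h1, b, hb, h2, h3⟩ | ⟨h1, _⟩)
      · exact ⟨b, ⟨hb, h2⟩, h3⟩
      · cases h1
  | true =>
    simp only [if_true]
    simp only [Bool.and_eq_true, List.contains_iff_mem, Bool.not_eq_true']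
    constructor
    · rintro ⟨⟨⟨h1, h2⟩, h3⟩, h4⟩
      exact Or.inr ⟨by trivial, h1, h2, h3, h4⟩
    · rintro (⟨h1, _⟩ | ⟨_, h2, h3, h4, h5⟩)
      · cases h1
      · exact ⟨⟨⟨h2, h3⟩, h4⟩, h5⟩

theorem any_mem_comm (u c : List String) :
    u.any (fun a => PySem.Set.contains c a) = c.any (fun l => PySem.Set.contains u l) := by
  rw [← Bool.coe_iff_coe]
  simp only [List.any_eq_true, PySem.Set.contains, List.contains_iff_mem]
  exact ⟨fun ⟨x, h1, h2⟩ => ⟨x, h2, h1⟩, fun ⟨x, h1, h2⟩ => ⟨x, h2, h1⟩⟩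

theorem inter_isEmpty_eq (c u : List String) :
    (PySem.Set.inter c u).isEmpty = c.all (fun l => !PySem.Set.contains (PySem.Set.ofList u) l) := by
  rw [← Bool.coe_iff_coe]
  simp only [PySem.Set.inter, List.isEmpty_iff, List.filter_eq_nil_iff, List.all_eq_true,
    PySem.Set.contains, List.contains_iff_mem, Bool.not_eq_true', ← Bool.not_eq_true]
  constructor
  · intro h l hl hc
    exact h l hl (by simpa [PySem.Set.mem_ofList] using hc)
  · intro h l hl hc
    exact h l hl (by simpa [PySem.Set.mem_ofList] using hc)

theorem outer_fold (used : List String) (l : List (List String)) (acc : List (List String)) :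
    l.foldl (fun acc c =>
      if checkComp c || used.any (fun a => PySem.Set.contains c a) then acc
      else
        if 0 < (used.foldl assumeStep c).length then acc ++ [used.foldl assumeStep c] else acc) acc
    = acc ++ l.filterMap (fun c =>
      if hasComp c || c.any (fun l => PySem.Set.contains used l) then none
      else
        if (c.filter (fun l =>
            !removableLit used (PySem.Set.ofList ((used.filter litPref).map litStrip)) l)).isEmpty
        then none
        else some (c.filter (fun l =>
          !removableLit used (PySem.Set.ofList ((used.filter litPref).map litStrip)) l))) := by
  induction l generalizing acc with
  | nil => simp
  | cons c l ih =>
    rw [List.foldl_cons, List.filterMap_cons]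
    rw [checkComp_eq_hasComp, any_mem_comm]
    cases hg : (hasComp c || c.any (fun l => PySem.Set.contains used l)) with
    | true =>
      simp only [if_true]
      rw [ih]
    | false =>
      simp only [Bool.false_eq_true, if_false]
      simp only [Bool.or_eq_false_iff] at hg
      obtain ⟨hnc, hdj⟩ := hg
      have hdisj : ∀ a ∈ used, a ∉ c := by
        intro a ha hac
        have : c.any (fun l => PySem.Set.contains used l) = true := by
          simp only [List.any_eq_true]
          exact ⟨a, hac, by simp [PySem.Set.contains, ha]⟩
        rw [this] at hdj; cases hdj
      have hc' : used.foldl assumeStep c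
          = c.filter (fun s =>
              !removableLit used (PySem.Set.ofList ((used.filter litPref).map litStrip)) s) := by
        rw [fold_eq_filter used c hnc hdisj]
        exact (List.filter_congr (fun s _ => by rw [removable_eq_remB])).symm
      simp only [hc']
      cases he : (c.filter (fun s =>
          !removableLit used (PySem.Set.ofList ((used.filter litPref).map litStrip)) s)).isEmpty with
      | true =>
        have hnil := List.isEmpty_iff.mp he
        rw [hnil]
        simp only [List.length_nil, lt_irrefl, if_false, if_true]
        rw [ih]
      | false =>
        have hpos : 0 < (c.filter (fun s =>
            !removableLit used (PySem.Set.ofList ((used.filter litPref).map litStrip)) s)).length := by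
          rw [List.length_pos_iff]
          exact List.isEmpty_eq_false_iff.mp he
        simp only [Bool.false_eq_true, if_false, if_pos hpos]
        rw [ih]
        simp

-- ===== VERDICT (by name: the statement is the Claim_ definition above) =====
theorem minimize_cnf_clauses_spec : Claim_equal_minimize_cnf_clauses := by
  intro clauses assumptions _hdom _hpre
  unfold Spec_minimize_cnf_clauses minimize_cnf_clauses minimize_cnf_clauses_alt
  simp only [inter_isEmpty_eq]
  rw [checkComp_eq_hasComp]
  split_ifs with hg
  · rfl
  · exact outer_fold _ _ _
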